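-- pv_equiv track=rewrite | github.com/manuelrubio/recursion | chapter01/listing_01_05.py | sum_list_length_3
-- ===== SOURCE A (Python) =====
-- def sum_list_length_3(a):
--     if len(a) == 0:
--         return 0
--     elif len(a) == 1:
--         return a[0]
--     else:
--         middle = len(a) // 2
--         return (sum_list_length_3(a[0:middle])
--                 + sum_list_length_3(a[middle:len(a)]))
-- ===== SOURCE B (Python) =====
-- def sum_list_length_3(a):
--     total = 0
--     for x in a:
--         total += x
--     return total
-- ===== Notes on version B (the rewrite author's own statement) =====
-- stated objective: faster
-- what changed: Replaces the divide-and-conquer recursion with repeated list slicing by a single iterative accumulator pass over the list.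
import Mathlib
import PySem

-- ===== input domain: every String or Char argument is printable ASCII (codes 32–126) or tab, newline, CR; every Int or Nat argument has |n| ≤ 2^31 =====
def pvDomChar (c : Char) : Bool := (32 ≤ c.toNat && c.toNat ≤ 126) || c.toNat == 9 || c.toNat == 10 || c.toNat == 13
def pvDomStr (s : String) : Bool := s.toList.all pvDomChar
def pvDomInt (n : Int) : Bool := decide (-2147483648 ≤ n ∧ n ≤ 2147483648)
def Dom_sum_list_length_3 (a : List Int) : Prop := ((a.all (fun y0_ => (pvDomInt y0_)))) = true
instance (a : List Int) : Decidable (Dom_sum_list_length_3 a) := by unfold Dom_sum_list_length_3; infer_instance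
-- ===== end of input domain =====

-- B replaces the balanced divide-and-conquer recursion by one iterative accumulator pass (simpler and avoids slice copies).

-- ===== PORT A =====
-- literal transliteration of A: len checks, middle = len // 2, two slices, recursive sum
def sum_list_length_3 (a : List Int) : Int :=
  if a.length = 0 then 0
  else if a.length = 1 then (PySem.List.pyGet? a 0).getD 0
  else
    let middle : Int := PySem.Int.floordiv (a.length : Int) 2
    sum_list_length_3 (PySem.List.slice a (some 0) (some middle)) +
    sum_list_length_3 (PySem.List.slice a (some middle) (some (a.length : Int)))
termination_by a.length
decreasing_by
  · have hm : PySem.Int.floordiv (a.length : Int) 2 = ((a.length / 2 : Nat) : Int) :=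
      PySem.Int.floordiv_natCast a.length 2
    rw [hm, PySem.List.slice_zero_start, PySem.List.slice_to_natCast]
    simp only [List.length_take]
    omega
  · have hm : PySem.Int.floordiv (a.length : Int) 2 = ((a.length / 2 : Nat) : Int) :=
      PySem.Int.floordiv_natCast a.length 2
    rw [hm, PySem.List.slice_natCast]
    simp only [List.length_take, List.length_drop]
    omega

-- ===== PORT B =====
-- literal transliteration of B: accumulator initialised to 0, one left-to-right pass
def sum_list_length_3_alt (a : List Int) : Int :=
  a.foldl (fun total x => total + x) 0

-- ===== PRECONDITION & SPEC =====
def Spec_sum_list_length_3 (a : List Int) (out : Int) : Prop := out = sum_list_length_3_alt a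
instance (a : List Int) (out : Int) : Decidable (Spec_sum_list_length_3 a out) := by unfold Spec_sum_list_length_3; infer_instance

-- ===== CLAIM (what is proved, stated in full; the proofs are below) =====
def Claim_equal_sum_list_length_3 : Prop := ∀ (a : List Int), Dom_sum_list_length_3 a → Spec_sum_list_length_3 a (sum_list_length_3 a)

-- ===== LEMMAS AND PROOFS =====

theorem foldl_add_eq_sum (a : List Int) (acc : Int) :
    a.foldl (fun total x => total + x) acc = acc + a.sum := by
  induction a generalizing acc with
  | nil => simp
  | cons x xs ih => simp [List.foldl, ih, List.sum_cons]; ring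

theorem alt_eq_sum (a : List Int) : sum_list_length_3_alt a = a.sum := by
  simp [sum_list_length_3_alt, foldl_add_eq_sum]

theorem a_eq_sum : ∀ (n : Nat) (a : List Int), a.length = n → sum_list_length_3 a = a.sum := by
  intro n
  induction n using Nat.strong_induction_on with
  | _ n ih =>
    intro a ha
    unfold sum_list_length_3
    split_ifs with h0 h1
    · have : a = [] := List.eq_nil_of_length_eq_zero h0
      simp [this]
    · match a, h1 with
      | [x], _ => simp [PySem.List.pyGet?, PySem.List.pyIdx?]
    · have hmid : PySem.Int.floordiv (a.length : Int) 2 = ((a.length / 2 : Nat) : Int) :=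
        PySem.Int.floordiv_natCast a.length 2
      simp only [hmid, PySem.List.slice_zero_start, PySem.List.slice_to_natCast,
          PySem.List.slice_natCast]
      have hlen : 2 ≤ a.length := by omega
      have h2 : a.length - a.length / 2 ≤ a.length := by omega
      rw [ih ((a.take (a.length / 2)).length) (by simp; omega) _ rfl,
          ih (((a.drop (a.length / 2)).take (a.length - a.length / 2)).length)
            (by simp; omega) _ rfl]
      have htake : (a.drop (a.length / 2)).take (a.length - a.length / 2)
          = a.drop (a.length / 2) := by
        apply List.take_of_length_le
        simp
      rw [htake, ← List.sum_append, List.take_append_drop]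

-- ===== VERDICT (by name: the statement is the Claim_ definition above) =====
theorem sum_list_length_3_spec : Claim_equal_sum_list_length_3 := by
  intro a _
  unfold Spec_sum_list_length_3
  rw [a_eq_sum a.length a rfl, alt_eq_sum]
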